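-- pv_equiv track=rewrite | github.com/asthagaur1/danfoss-bdd-automation | SourceCode/lib/AKCC55/AKCC55.py | _get_group_name_from_multi_level_group
-- ===== SOURCE A (Python) =====
-- def _get_group_name_from_multi_level_group(groupName):
--     """
--     Returns group Name of dataGrid format.
--     :param groupName: Multi level group name. Example: "Main menu|Miscellaneous|Factory reset"
--     :return: GroupName of dataGrid format. Example: "Miscellaneous-Factory reset".
--
--     """
--     groupName = groupName.split('|')
--     grpName = ''
--     count = 0
--     for i in groupName:
--         if count == 0:
--             count = count + 1
--             continue
--         if count == 1:
--             grpName = i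
--             count = count + 1
--             continue
--         grpName = grpName + "-" + i
--
--     return grpName
-- ===== SOURCE B (Python) =====
-- def _get_group_name_from_multi_level_group(groupName):
--     idx = groupName.find('|')
--     if idx == -1:
--         return ''
--     return groupName[idx + 1:].replace('|', '-')
-- ===== Notes on version B (the rewrite author's own statement) =====
-- stated objective: idiomatic
-- what changed: Replaces A's split-into-list plus counter-driven accumulation loop by direct string operations: find the first '|', slice off everything up to and including it, and replace the remaining '|' with '-'; no token list or join loop is built.
import Mathlib
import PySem

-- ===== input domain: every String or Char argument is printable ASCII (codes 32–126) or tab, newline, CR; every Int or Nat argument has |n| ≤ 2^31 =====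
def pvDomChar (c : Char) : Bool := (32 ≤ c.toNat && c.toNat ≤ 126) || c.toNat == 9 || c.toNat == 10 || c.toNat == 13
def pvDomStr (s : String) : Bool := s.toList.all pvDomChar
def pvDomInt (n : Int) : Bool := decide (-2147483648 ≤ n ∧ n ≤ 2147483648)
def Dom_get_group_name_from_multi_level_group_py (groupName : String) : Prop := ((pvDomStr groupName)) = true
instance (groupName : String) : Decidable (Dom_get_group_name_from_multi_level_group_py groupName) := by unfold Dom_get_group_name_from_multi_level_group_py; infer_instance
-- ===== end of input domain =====

-- B replaces A's split/counter-loop/join by find + slice + replace on the raw string (idiomatic, no intermediate list).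

-- ===== PORT A =====
-- A: split on '|', then a counter loop that skips the first part, takes the second,
-- and appends "-" ++ part for the rest.  Strings are carried as List Char.
def get_group_name_from_multi_level_group_py (groupName : String) : String :=
  let parts : List (List Char) := PySem.Chars.splitOn groupName.toList ['|']   -- groupName.split('|'), sep nonempty
  let r := parts.foldl (fun (st : List Char × Int) i =>
      if st.2 == 0 then (st.1, st.2 + 1)
      else if st.2 == 1 then (i, st.2 + 1)
      else (st.1 ++ ['-'] ++ i, st.2)) ([], 0)
  String.ofList r.1

-- ===== PORT B =====
def get_group_name_from_multi_level_group_py_alt (groupName : String) : String :=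
  let idx := PySem.Str.find groupName "|"
  if idx == -1 then ""
  else PySem.Str.replace (PySem.Str.slice groupName (some (idx + 1)) none) "|" "-"

-- ===== PRECONDITION & SPEC =====
def Spec_get_group_name_from_multi_level_group_py (groupName : String) (out : String) : Prop := out = get_group_name_from_multi_level_group_py_alt groupName
instance (groupName : String) (out : String) : Decidable (Spec_get_group_name_from_multi_level_group_py groupName out) := by unfold Spec_get_group_name_from_multi_level_group_py; infer_instance

-- ===== CLAIM (what is proved, stated in full; the proofs are below) =====
def Claim_equal_get_group_name_from_multi_level_group_py : Prop := ∀ (groupName : String), Dom_get_group_name_from_multi_level_group_py groupName → Spec_get_group_name_from_multi_level_group_py groupName (get_group_name_from_multi_level_group_py groupName)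

-- ===== LEMMAS AND PROOFS =====

-- character substitution performed by replacing '|' with '-'
def pvSwap (c : Char) : Char := if '|' == c then '-' else c

-- the single-char-separator predicate used by PySem.Chars.splitOn with sep = ['|']
def pvP (c : Char) : Bool := '|' == c

theorem pv_find_go_not_mem (cs : List Char) (k : Nat) (h : '|' ∉ cs) :
    PySem.Chars.find.go ['|'] cs k = -1 := by
  induction cs generalizing k with
  | nil => simp [PySem.Chars.find.go]
  | cons c t ih =>
    simp only [List.mem_cons, not_or] at h
    simp only [PySem.Chars.find.go, List.isPrefixOf]
    have hb : ('|' == c && true) = false := by simp [h.1]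
    simp only [hb, Bool.false_eq_true, if_false]
    exact ih (k + 1) h.2

theorem pv_find_go_mem (cs : List Char) (k : Nat) (h : '|' ∈ cs) :
    ∃ xs ys, cs = xs ++ '|' :: ys ∧ '|' ∉ xs ∧
      PySem.Chars.find.go ['|'] cs k = (k : Int) + xs.length := by
  induction cs generalizing k with
  | nil => simp at h
  | cons c t ih =>
    by_cases hc : c = '|'
    · exact ⟨[], t, by simp [hc], by simp,
        by simp [PySem.Chars.find.go, List.isPrefixOf, hc]⟩
    · have ht : '|' ∈ t := by
        rcases List.mem_cons.mp h with h1 | h1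
        · exact absurd h1.symm hc
        · exact h1
      obtain ⟨xs, ys, he, hnx, hgo⟩ := ih (k + 1) ht
      refine ⟨c :: xs, ys, by simp [he], by simp [hnx, Ne.symm hc], ?_⟩
      simp only [PySem.Chars.find.go, List.isPrefixOf]
      have : ('|' == c) = false := by simp [Ne.symm hc]
      simp only [this, Bool.false_and, Bool.false_eq_true, if_false]
      rw [hgo]
      simp
      omega

theorem pv_replace_go (l : List Char) (fuel : Nat) (acc : List Char) (h : l.length ≤ fuel) :
    PySem.Chars.replace.go ['|'] ['-'] fuel l acc = acc.reverse ++ l.map pvSwap := by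
  induction l generalizing fuel acc with
  | nil => cases fuel <;> simp [PySem.Chars.replace.go]
  | cons c t ih =>
    cases fuel with
    | zero => simp at h
    | succ f =>
      by_cases hc : '|' = c
      · subst hc
        have hstep := ih f ('-' :: acc) (by simpa using h)
        simp [PySem.Chars.replace.go, List.isPrefixOf, hstep, pvSwap]
      · have hb : ('|' == c) = false := by simp [hc]
        simp only [PySem.Chars.replace.go, List.isPrefixOf]
        rw [if_neg (by simp [hb])]
        rw [ih f (c :: acc) (by simpa using h)]
        simp [pvSwap, hc]

theorem pv_splitOn_go' (l : List Char) (fuel : Nat) (cur : List Char) (acc : List (List Char))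
    (h : l.length < fuel) :
    PySem.Chars.splitOn.go ['|'] fuel l cur acc =
      acc.reverse ++ (List.splitOnP pvP l).modifyHead (cur.reverse ++ ·) := by
  induction l generalizing fuel cur acc with
  | nil =>
    cases fuel with
    | zero => simp at h
    | succ f => simp [PySem.Chars.splitOn.go, List.splitOnP_nil]
  | cons c t ih =>
    cases fuel with
    | zero => simp at h
    | succ f =>
      have hne := List.splitOnP_ne_nil pvP t
      obtain ⟨q0, qs, hq⟩ : ∃ q0 qs, List.splitOnP pvP t = q0 :: qs := by
        cases hh : List.splitOnP pvP t with
        | nil => exact absurd hh hne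
        | cons a b => exact ⟨a, b, rfl⟩
      by_cases hc : '|' = c
      · subst hc
        have hstep := ih f [] (cur.reverse :: acc) (by simp at h ⊢; omega)
        rw [List.splitOnP_cons]
        have hp : pvP '|' = true := by simp [pvP]
        simp [PySem.Chars.splitOn.go, List.isPrefixOf, hstep, hp, hq]
      · have hb : ('|' == c) = false := by simp [hc]
        simp only [PySem.Chars.splitOn.go, List.isPrefixOf, hb, Bool.false_and,
          Bool.false_eq_true, if_false]
        rw [ih f (c :: cur) acc (by simp at h ⊢; omega)]
        rw [List.splitOnP_cons]
        have : pvP c = false := by simp [pvP, hc]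
        simp [this, hq]

theorem pv_fold2 (rs : List (List Char)) (g : List Char) :
    (rs.foldl (fun (st : List Char × Int) i =>
      if st.2 == 0 then (st.1, st.2 + 1)
      else if st.2 == 1 then (i, st.2 + 1)
      else (st.1 ++ ['-'] ++ i, st.2)) (g, 2)).1
    = g ++ rs.flatMap (fun p => '-' :: p) := by
  induction rs generalizing g with
  | nil => simp
  | cons p rs ih =>
    have h0 : ((2 : Int) == 0) = false := by decide
    have h1 : ((2 : Int) == 1) = false := by decide
    simp only [List.foldl_cons, h0, h1, Bool.false_eq_true, if_false]
    rw [ih (g ++ ['-'] ++ p)]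
    simp

theorem pv_gJoin (ys : List Char) (q0 : List Char) (qs : List (List Char))
    (h : List.splitOnP pvP ys = q0 :: qs) :
    q0 ++ qs.flatMap (fun p => '-' :: p) = ys.map pvSwap := by
  induction ys generalizing q0 qs with
  | nil =>
    simp only [List.splitOnP_nil] at h
    cases h; simp
  | cons c t ih =>
    have hne := List.splitOnP_ne_nil pvP t
    obtain ⟨h0, hs, hh⟩ : ∃ h0 hs, List.splitOnP pvP t = h0 :: hs := by
      cases hh : List.splitOnP pvP t with
      | nil => exact absurd hh hne
      | cons a b => exact ⟨a, b, rfl⟩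
    rw [List.splitOnP_cons] at h
    by_cases hc : '|' = c
    · have hp : pvP c = true := by simpa [pvP] using hc
      rw [hp, if_pos rfl] at h
      obtain ⟨hq0, hqs⟩ := List.cons_eq_cons.mp h
      subst hq0
      have hsw : pvSwap c = '-' := by simp [pvSwap, ← hc]
      simp [← hqs, hh, hsw, ← ih h0 hs hh]
    · have hp : pvP c = false := by simp [pvP, hc]
      rw [hp] at h
      simp only [Bool.false_eq_true, if_false, hh, List.modifyHead_cons] at h
      obtain ⟨hq0, hqs⟩ := List.cons_eq_cons.mp h
      subst hq0
      have hsw : pvSwap c = c := by simp [pvSwap, hc]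
      simp [← hqs, hsw, ← ih h0 hs hh]

-- ===== VERDICT (by name: the statement is the Claim_ definition above) =====
theorem get_group_name_from_multi_level_group_py_spec : Claim_equal_get_group_name_from_multi_level_group_py := by
  intro groupName _
  unfold Spec_get_group_name_from_multi_level_group_py
  unfold get_group_name_from_multi_level_group_py get_group_name_from_multi_level_group_py_alt
  set cs := groupName.toList with hcs
  have hsplit : PySem.Chars.splitOn cs ['|'] = List.splitOnP pvP cs := by
    rw [PySem.Chars.splitOn, pv_splitOn_go' cs (cs.length + 1) [] [] (by omega)]
    have hne := List.splitOnP_ne_nil pvP cs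
    cases hh : List.splitOnP pvP cs with
    | nil => exact absurd hh hne
    | cons a b => simp
  by_cases hmem : '|' ∈ cs
  · obtain ⟨xs, ys, he, hnx, hgo⟩ := pv_find_go_mem cs 0 hmem
    have hfind : PySem.Str.find groupName "|" = (xs.length : Int) := by
      rw [PySem.Str.find, ← hcs]
      show PySem.Chars.find cs ['|'] = _
      rw [PySem.Chars.find, hgo]; simp
    have hbeq : (((xs.length : Int)) == -1) = false := by
      simp only [beq_eq_false_iff_ne, ne_eq]
      omega
    simp only [hfind, hbeq, Bool.false_eq_true, if_false]
    -- B side: slice then replace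
    have hslice : (PySem.Str.slice groupName (some ((xs.length : Int) + 1)) none).toList = ys := by
      have : ((xs.length : Int) + 1) = ((xs.length + 1 : Nat) : Int) := by push_cast; ring
      rw [this]
      simp only [PySem.Str.toList_slice, PySem.Chars.slice_eq_listSlice, ← hcs]
      rw [PySem.List.slice_from_natCast]
      rw [he]
      have : xs ++ '|' :: ys = (xs ++ ['|']) ++ ys := by simp
      rw [this]
      have hlen : xs.length + 1 = (xs ++ ['|']).length := by simp
      rw [hlen, List.drop_left]
    have hrep : PySem.Str.replace (PySem.Str.slice groupName (some ((xs.length : Int) + 1)) none) "|" "-"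
        = String.ofList (ys.map pvSwap) := by
      rw [PySem.Str.replace, hslice]
      congr 1
      show PySem.Chars.replace ys ['|'] ['-'] = ys.map pvSwap
      rw [PySem.Chars.replace]
      simp only [List.isEmpty_cons, Bool.false_eq_true, if_false]
      exact pv_replace_go ys ys.length [] (le_refl _)
    rw [hrep]
    -- A side
    have hP : List.splitOnP pvP cs = xs :: List.splitOnP pvP ys := by
      rw [he]
      exact List.splitOnP_first pvP xs (by intro x hx; simp [pvP]; intro hc; exact hnx (hc ▸ hx))
        '|' (by simp [pvP]) ys
    have hne := List.splitOnP_ne_nil pvP ys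
    obtain ⟨q0, qs, hq⟩ : ∃ q0 qs, List.splitOnP pvP ys = q0 :: qs := by
      cases hh : List.splitOnP pvP ys with
      | nil => exact absurd hh hne
      | cons a b => exact ⟨a, b, rfl⟩
    simp only [hsplit, hP, hq]
    congr 1
    rw [List.foldl_cons, List.foldl_cons]
    exact (pv_fold2 qs q0).trans (pv_gJoin ys q0 qs hq)
  · have hfind : PySem.Str.find groupName "|" = -1 := by
      rw [PySem.Str.find, ← hcs]
      show PySem.Chars.find cs ['|'] = _
      rw [PySem.Chars.find]
      exact pv_find_go_not_mem cs 0 hmem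
    simp only [hfind]
    have hsingle : List.splitOnP pvP cs = [cs] :=
      List.splitOnP_eq_single pvP cs (by intro x hx; simp [pvP]; intro hc; exact hmem (hc ▸ hx))
    simp [hsplit, hsingle]
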